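-- pv_equiv track=rewrite | github.com/sgprasad66/ChartInkScreenerScraper | Finvasia_Get_Strike_From_Given_Premium.py | contains_substring_after_numerics
-- ===== SOURCE A (Python) =====
-- def contains_substring_after_numerics(input_string, substring):
--     # Reverse both the input string and the substring
--     reversed_input = input_string[::-1]
--     reversed_substring = substring[::-1]
--     count=0
--     # Initialize a flag to track if numeric characters are encountered
--     numeric_found = False
--
--     # Iterate through the reversed input string
--     for char in reversed_input:
--         if char.isdigit() or char == '.':
--             numeric_found = True
--         elif numeric_found:
--             # Check if the reversed substring appears after numerics
--             if reversed_substring[0] == reversed_input[count]: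
--                 return True
--             else:
--                 return False
--         count = count+1
--     return False
-- ===== SOURCE B (Python) =====
-- def contains_substring_after_numerics(input_string, substring):
--     def num(c):
--         return c.isdigit() or c == '.'
--     # forward scan: remember the last char that precedes a numeric run
--     last = None
--     for a, b in zip(input_string, input_string[1:]):
--         if not num(a) and num(b):
--             last = a
--     if last is None:
--         return False
--     return last == substring[-1]
-- ===== Notes on version B (the rewrite author's own statement) =====
-- stated objective: simpler
-- what changed: Replaced A's backward scan of the reversed strings with a numeric-found flag and a manually maintained count index by a single forward pass over adjacent character pairs that remembers the last boundary char preceding a numeric run, compared at the end with substring[-1].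
import Mathlib
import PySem

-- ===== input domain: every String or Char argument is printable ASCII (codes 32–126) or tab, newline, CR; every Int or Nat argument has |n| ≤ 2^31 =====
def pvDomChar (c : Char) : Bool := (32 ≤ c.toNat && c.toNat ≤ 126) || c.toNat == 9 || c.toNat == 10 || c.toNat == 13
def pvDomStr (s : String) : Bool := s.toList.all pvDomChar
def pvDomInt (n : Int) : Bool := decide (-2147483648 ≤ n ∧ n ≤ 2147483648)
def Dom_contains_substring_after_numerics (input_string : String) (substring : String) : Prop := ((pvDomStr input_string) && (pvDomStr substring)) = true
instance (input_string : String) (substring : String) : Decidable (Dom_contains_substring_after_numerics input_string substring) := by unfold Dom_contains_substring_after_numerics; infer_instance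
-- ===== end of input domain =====

-- B replaces A's reversed-scan with flag and running index by a forward scan over adjacent
-- pairs that keeps the last boundary char before a numeric run (objective: simpler).

-- digit-or-dot predicate: `c.isdigit() or c == '.'` (ASCII domain: Char.isDigit is exact)
def pvNum (c : Char) : Bool := c.isDigit || c == '.'

-- ===== PORT A =====
-- A's for-loop over reversed_input with `count` and `numeric_found`; the `count = count+1`
-- at the end of each iteration is the +1 in both recursive calls.  On the branch where
-- Python would raise IndexError (reversed_substring[0] with empty substring) pyGet? is
-- none and the port returns false; Pre_ excludes exactly those inputs.
def pvLoopA (rsub : List Char) (rin : List Char) : List Char → Int → Bool → Bool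
  | [], _, _ => false
  | c :: rest, count, nf =>
    if pvNum c then pvLoopA rsub rin rest (count + 1) true
    else if nf then
      match PySem.List.pyGet? rsub 0, PySem.List.pyGet? rin count with
      | some r0, some rc => r0 == rc
      | _, _ => false
    else pvLoopA rsub rin rest (count + 1) nf

def contains_substring_after_numerics (input_string : String) (substring : String) : Bool :=
  -- input_string[::-1], substring[::-1]
  let reversed_input := input_string.toList.reverse
  let reversed_substring := substring.toList.reverse
  pvLoopA reversed_substring reversed_input reversed_input 0 false

-- ===== PORT B =====
-- B's step: remember the last `a` of an adjacent pair (a, b) with ¬num a ∧ num b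
def pvStepB (acc : Option Char) (p : Char × Char) : Option Char :=
  if !pvNum p.1 && pvNum p.2 then some p.1 else acc

def contains_substring_after_numerics_alt (input_string : String) (substring : String) : Bool :=
  match (input_string.toList.zip input_string.toList.tail).foldl pvStepB none with
  | none => false
  | some c =>
    -- substring[-1]; none = IndexError, excluded by Pre_
    match PySem.List.pyGet? substring.toList (-1) with
    | some s => c == s
    | none => false

-- ===== PRECONDITION & SPEC =====
-- Pre_ excludes only the inputs where the Python programs raise IndexError: an empty
-- substring together with an input string containing a boundary (a non-numeric char
-- immediately followed by a digit/'.'), where A evaluates reversed_substring[0]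
-- (and B evaluates substring[-1]).
def Pre_contains_substring_after_numerics (input_string : String) (substring : String) : Prop :=
  substring ≠ "" ∨
    ∀ p ∈ input_string.toList.zip input_string.toList.tail, ¬(pvNum p.1 = false ∧ pvNum p.2 = true)

instance (input_string : String) (substring : String) : Decidable (Pre_contains_substring_after_numerics input_string substring) := by
  unfold Pre_contains_substring_after_numerics; infer_instance

def pvWitness_contains_substring_after_numerics : String × String := ("a1b", "xa")

def Spec_contains_substring_after_numerics (input_string : String) (substring : String) (out : Bool) : Prop := out = contains_substring_after_numerics_alt input_string substring
instance (input_string : String) (substring : String) (out : Bool) : Decidable (Spec_contains_substring_after_numerics input_string substring out) := by unfold Spec_contains_substring_after_numerics; infer_instance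

-- ===== CLAIM (what is proved, stated in full; the proofs are below) =====
def Claim_equal_contains_substring_after_numerics : Prop := ∀ (input_string : String) (substring : String), Dom_contains_substring_after_numerics input_string substring → Pre_contains_substring_after_numerics input_string substring → Spec_contains_substring_after_numerics input_string substring (contains_substring_after_numerics input_string substring)

-- ===== LEMMAS AND PROOFS =====

-- the value A returns when the scan fires on char c
def pvFire (rsub : List Char) (c : Char) : Bool :=
  match PySem.List.pyGet? rsub 0 with
  | some r0 => r0 == c
  | none => false

-- A's scan with the index stripped out: nf = "previous char was numeric"
def pvFirstB : List Char → Bool → Option Char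
  | [], _ => none
  | c :: rest, nf =>
    if pvNum c then pvFirstB rest true
    else if nf then some c
    else pvFirstB rest false

-- A's loop returns pvFire applied to the char pvFirstB finds
theorem pvLoopA_eq_firstB (rsub : List Char) :
    ∀ (suf pre : List Char) (nf : Bool),
      pvLoopA rsub (pre ++ suf) suf (pre.length : Int) nf =
        (match pvFirstB suf nf with
         | none => false
         | some c => pvFire rsub c) := by
  intro suf
  induction suf with
  | nil => intro pre nf; simp [pvLoopA, pvFirstB]
  | cons c rest ih =>
    intro pre nf
    have hget : PySem.List.pyGet? (pre ++ c :: rest) (pre.length : Int) = some c := by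
      rw [PySem.List.pyGet?_natCast]
      simp
    have hlen : (pre.length : Int) + 1 = ((pre ++ [c]).length : Int) := by
      simp
    by_cases hnc : pvNum c
    · simp only [pvLoopA, pvFirstB, hnc, if_true, hlen]
      have := ih (pre ++ [c]) true
      simpa using this
    · simp only [pvLoopA, pvFirstB, hnc, if_false, Bool.false_eq_true]
      cases nf with
      | true =>
        simp only [if_true, hget, pvFire]
        cases PySem.List.pyGet? rsub 0 <;> rfl
      | false =>
        simp only [if_false, Bool.false_eq_true, hlen]
        have := ih (pre ++ [c]) false
        simpa using this

-- leading char just initialises the flag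
theorem pvFirstB_cons_false (c : Char) (rest : List Char) :
    pvFirstB (c :: rest) false = pvFirstB rest (pvNum c) := by
  by_cases h : pvNum c <;> simp [pvFirstB, h]

-- adjacent pairs of l ++ [x]
theorem zip_tail_concat (l : List Char) (x : Char) :
    (l ++ [x]).zip (l ++ [x]).tail =
      l.zip l.tail ++ (match l.getLast? with
                       | some d => [(d, x)]
                       | none => []) := by
  induction l with
  | nil => simp
  | cons a t ih =>
    cases t with
    | nil => simp
    | cons b t' =>
      simp only [List.cons_append, List.zip_cons_cons, List.tail_cons] at *
      rw [ih]
      simp [List.getLast?_cons_cons]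

-- core: A's backward scan of ys++[c] equals B's forward fold over its adjacent pairs
theorem firstB_reverse_eq_foldl :
    ∀ (ys : List Char) (c : Char),
      pvFirstB ys.reverse (pvNum c) =
        ((ys ++ [c]).zip (ys ++ [c]).tail).foldl pvStepB none := by
  intro ys
  induction ys using List.reverseRecOn with
  | nil => intro c; simp [pvFirstB]
  | append_singleton zs b ih =>
    intro c
    rw [zip_tail_concat (zs ++ [b]) c]
    simp only [List.getLast?_append, List.getLast?_singleton,
      List.foldl_append]
    rw [← ih b]
    simp only [List.reverse_append, List.reverse_singleton, List.singleton_append]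
    by_cases hb : pvNum b
    · simp [pvFirstB, pvStepB, hb]
    · by_cases hc : pvNum c <;> simp [pvFirstB, pvStepB, hb, hc]

-- the full correspondence between the two option-valued scans
theorem firstB_rev_eq_foldl_all (xs : List Char) :
    pvFirstB xs.reverse false = (xs.zip xs.tail).foldl pvStepB none := by
  induction xs using List.reverseRecOn with
  | nil => simp [pvFirstB]
  | append_singleton ys c _ =>
    rw [List.reverse_append, List.reverse_singleton, List.singleton_append,
      pvFirstB_cons_false, firstB_reverse_eq_foldl]

-- substring[-1] seen from the reversed side
theorem pyGet?_rev_zero (l : List Char) :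
    PySem.List.pyGet? l.reverse 0 = PySem.List.pyGet? l (-1) := by
  cases l using List.reverseRecOn with
  | nil => rfl
  | append_singleton t x _ =>
    rw [PySem.List.pyGet?_neg_one_append_singleton]
    simp [PySem.List.pyGet?, PySem.List.pyIdx?]

-- ===== VERDICT (by name: the statement is the Claim_ definition above) =====
theorem contains_substring_after_numerics_spec : Claim_equal_contains_substring_after_numerics := by
  intro input_string substring _ _
  unfold Spec_contains_substring_after_numerics
  unfold contains_substring_after_numerics contains_substring_after_numerics_alt
  have h0 := pvLoopA_eq_firstB substring.toList.reverse input_string.toList.reverse [] false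
  simp only [List.nil_append, List.length_nil, Nat.cast_zero] at h0
  rw [h0, firstB_rev_eq_foldl_all]
  cases hfold : (input_string.toList.zip input_string.toList.tail).foldl pvStepB none with
  | none => rfl
  | some c =>
    simp only [pvFire, pyGet?_rev_zero]
    cases hs : PySem.List.pyGet? substring.toList (-1) with
    | none => rfl
    | some s => simp [Bool.beq_comm]
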